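-- pv_equiv track=rewrite | github.com/JonOfScience/EtymTreePython | src/core/lexicon.py | _split_string_into_groups
-- ===== SOURCE A (Python) =====
-- def _split_string_into_groups(to_split: str):
--     # Split to_validate into groups
--     delimiter_processing_order = ['|', '][', '[', ']']
--     string_set = [to_split]
--     new_string_set = []
--     for delimeter in delimiter_processing_order:
--         for element in string_set:
--             new_string_set.extend(element.split(sep=delimeter))
--         string_set = new_string_set.copy()
--         new_string_set.clear()
--     return string_set
-- ===== SOURCE B (Python) =====
-- def _split_string_into_groups(to_split: str):
--     # One left-to-right scan cutting at '][' (two chars, highest priority) or any of '|', '[', ']'.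
--     groups = []
--     current = []
--     i = 0
--     n = len(to_split)
--     while i < n:
--         if to_split.startswith('][', i):
--             groups.append(''.join(current))
--             current = []
--             i += 2
--         elif to_split[i] in '|[]':
--             groups.append(''.join(current))
--             current = []
--             i += 1
--         else:
--             current.append(to_split[i])
--             i += 1
--     groups.append(''.join(current))
--     return groups
-- ===== Notes on version B (the rewrite author's own statement) =====
-- stated objective: simpler
-- what changed: Replaced A's four successive whole-list splitting passes (one per delimiter, rebuilding the list of pieces each time) by a single left-to-right scan that cuts at '][' (checked first) or at any of '|', '[', ']'.
import Mathlib
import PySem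

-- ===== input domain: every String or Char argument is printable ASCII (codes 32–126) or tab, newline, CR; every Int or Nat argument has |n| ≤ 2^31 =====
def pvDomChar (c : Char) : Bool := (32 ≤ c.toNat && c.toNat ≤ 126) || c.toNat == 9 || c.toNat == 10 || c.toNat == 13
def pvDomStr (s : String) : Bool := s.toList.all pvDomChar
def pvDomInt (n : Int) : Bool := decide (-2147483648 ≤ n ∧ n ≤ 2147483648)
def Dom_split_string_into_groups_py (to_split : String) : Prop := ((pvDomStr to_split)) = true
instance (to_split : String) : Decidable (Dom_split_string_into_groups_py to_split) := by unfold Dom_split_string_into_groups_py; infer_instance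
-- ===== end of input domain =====

-- B replaces A's four successive whole-list splitting passes by ONE left-to-right scan
-- that cuts at '][' (checked first) or at '|', '[', ']' (objective: simpler, one pass).

-- ===== PORT A =====
-- literal transliteration: for each delimiter in order, re-split every piece of the current list
def split_string_into_groups_py (to_split : String) : List String :=
  let delimiter_processing_order : List String := ["|", "][", "[", "]"]
  let string_set : List String := [to_split]
  delimiter_processing_order.foldl
    (fun string_set delimeter =>
      string_set.foldl
        (fun new_string_set element =>
          new_string_set ++ ((PySem.Str.split? element delimeter).getD []))
        [])
    string_set

-- ===== PORT B =====
-- hand port of Source B's while-loop scan (exact: startswith('][', i) = the take/drop test,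
-- membership in '|[]' = the three-way disjunction, current/groups = cur and the result list)
def scanB (cur : List Char) (s : List Char) : List (List Char) :=
  match s with
  | [] => [cur]
  | c :: rest =>
    if c = ']' ∧ rest.take 1 = ['['] then cur :: scanB [] (rest.drop 1)
    else if c = '|' ∨ c = '[' ∨ c = ']' then cur :: scanB [] rest
    else scanB (cur ++ [c]) rest
termination_by s.length
decreasing_by all_goals (simp; try omega)

def split_string_into_groups_py_alt (to_split : String) : List String :=
  (scanB [] to_split.toList).map String.ofList

-- ===== PRECONDITION & SPEC =====
def Spec_split_string_into_groups_py (to_split : String) (out : List String) : Prop := out = split_string_into_groups_py_alt to_split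
instance (to_split : String) (out : List String) : Decidable (Spec_split_string_into_groups_py to_split out) := by unfold Spec_split_string_into_groups_py; infer_instance

-- ===== CLAIM (what is proved, stated in full; the proofs are below) =====
def Claim_equal_split_string_into_groups_py : Prop := ∀ (to_split : String), Dom_split_string_into_groups_py to_split → Spec_split_string_into_groups_py to_split (split_string_into_groups_py to_split)

-- ===== LEMMAS AND PROOFS =====

/-- prepend `pre` onto the first group (a singleton group if there is none) -/
def consHead (pre : List Char) : List (List Char) → List (List Char)
  | [] => [pre]
  | g :: gs => (pre ++ g) :: gs

/-- structural version of Python's `str.split` with nonempty separator `s0 :: sep` -/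
def splitC (s0 : Char) (sep : List Char) (l : List Char) : List (List Char) :=
  match l with
  | [] => [[]]
  | c :: rest =>
    if (s0 :: sep).isPrefixOf (c :: rest) then [] :: splitC s0 sep (rest.drop sep.length)
    else consHead [c] (splitC s0 sep rest)
termination_by l.length
decreasing_by all_goals (simp; try omega)

theorem consHead_ne_nil (pre : List Char) (L : List (List Char)) : consHead pre L ≠ [] := by
  cases L <;> simp [consHead]

theorem splitC_ne_nil (s0 : Char) (sep : List Char) (l : List Char) :
    splitC s0 sep l ≠ [] := by
  cases l with
  | nil => simp [splitC]
  | cons c rest =>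
    rw [splitC]
    split
    · simp
    · exact consHead_ne_nil _ _

theorem splitC_hit {s0 : Char} {sep : List Char} {c : Char} {rest : List Char}
    (hp : (s0 :: sep).isPrefixOf (c :: rest)) :
    splitC s0 sep (c :: rest) = [] :: splitC s0 sep (rest.drop sep.length) := by
  conv_lhs => rw [splitC]
  rw [if_pos hp]

theorem splitC_miss {s0 : Char} {sep : List Char} {c : Char} {rest : List Char}
    (hp : ¬ (s0 :: sep).isPrefixOf (c :: rest)) :
    splitC s0 sep (c :: rest) = consHead [c] (splitC s0 sep rest) := by
  conv_lhs => rw [splitC]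
  rw [if_neg hp]

theorem go_eq (s0 : Char) (sep : List Char) :
    ∀ (fuel : Nat) (l cur : List Char) (acc : List (List Char)), l.length < fuel →
    PySem.Chars.splitOn.go (s0 :: sep) fuel l cur acc
      = acc.reverse ++ consHead cur.reverse (splitC s0 sep l) := by
  intro fuel
  induction fuel with
  | zero => intro l cur acc h; exact absurd h (Nat.not_lt_zero _)
  | succ n ih =>
    intro l cur acc h
    cases l with
    | nil =>
      rw [show PySem.Chars.splitOn.go (s0 :: sep) (n + 1) [] cur acc
            = (cur.reverse :: acc).reverse from rfl]
      rw [show splitC s0 sep [] = [[]] from by rw [splitC]]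
      simp [consHead]
    | cons c rest =>
      rw [show PySem.Chars.splitOn.go (s0 :: sep) (n + 1) (c :: rest) cur acc
            = if (s0 :: sep).isPrefixOf (c :: rest) then
                PySem.Chars.splitOn.go (s0 :: sep) n ((c :: rest).drop (s0 :: sep).length) []
                  (cur.reverse :: acc)
              else PySem.Chars.splitOn.go (s0 :: sep) n rest (c :: cur) acc from rfl]
      by_cases hp : (s0 :: sep).isPrefixOf (c :: rest)
      · rw [if_pos hp]
        have hd : (c :: rest).drop (s0 :: sep).length = rest.drop sep.length := by
          simp
        have hlen : ((c :: rest).drop (s0 :: sep).length).length < n := by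
          simp only [List.length_drop, List.length_cons]
          simp at h
          omega
        rw [ih _ _ _ hlen, hd, splitC_hit hp]
        rcases hx : splitC s0 sep (rest.drop sep.length) with _ | ⟨g, gs⟩
        · exact absurd hx (splitC_ne_nil _ _ _)
        · simp [consHead]
      · rw [if_neg hp]
        have hlen : rest.length < n := by simp at h; omega
        rw [ih _ _ _ hlen, splitC_miss hp]
        rcases hx : splitC s0 sep rest with _ | ⟨g, gs⟩
        · exact absurd hx (splitC_ne_nil _ _ _)
        · simp [consHead]

theorem splitOn_eq (s0 : Char) (sep : List Char) (l : List Char) :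
    PySem.Chars.splitOn l (s0 :: sep) = splitC s0 sep l := by
  rw [show PySem.Chars.splitOn l (s0 :: sep)
        = PySem.Chars.splitOn.go (s0 :: sep) (l.length + 1) l [] [] from rfl]
  rw [go_eq s0 sep (l.length + 1) l [] [] (by omega)]
  rcases hx : splitC s0 sep l with _ | ⟨g, gs⟩
  · exact absurd hx (splitC_ne_nil _ _ _)
  · simp [consHead]

-- the four stages of A, on lists of code points
def st1 (l : List Char) : List (List Char) := splitC '|' [] l
def st2 (l : List Char) : List (List Char) := (st1 l).flatMap (splitC ']' ['['])
def st3 (l : List Char) : List (List Char) := (st2 l).flatMap (splitC '[' [])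
def pipeAll (l : List Char) : List (List Char) := (st3 l).flatMap (splitC ']' [])

theorem st1_ne_nil (l : List Char) : st1 l ≠ [] := splitC_ne_nil _ _ _
theorem flatMap_ne_nil {f : List Char → List (List Char)} (hf : ∀ x, f x ≠ [])
    {L : List (List Char)} (hL : L ≠ []) : L.flatMap f ≠ [] := by
  rcases L with _ | ⟨g, gs⟩
  · exact absurd rfl hL
  · rcases h : f g with _ | ⟨x, xs⟩
    · exact absurd h (hf g)
    · simp [h]
theorem st2_ne_nil (l : List Char) : st2 l ≠ [] :=
  flatMap_ne_nil (splitC_ne_nil _ _) (st1_ne_nil l)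
theorem st3_ne_nil (l : List Char) : st3 l ≠ [] :=
  flatMap_ne_nil (splitC_ne_nil _ _) (st2_ne_nil l)
theorem pipeAll_ne_nil (l : List Char) : pipeAll l ≠ [] :=
  flatMap_ne_nil (splitC_ne_nil _ _) (st3_ne_nil l)

-- generic propagation lemmas
theorem fm_cut {f : List Char → List (List Char)} (hf0 : f [] = [[]])
    (L : List (List Char)) : ([] :: L).flatMap f = [] :: L.flatMap f := by
  simp [hf0]

theorem fm_cut_at {f : List Char → List (List Char)} {c : Char}
    (hc : ∀ l, f (c :: l) = [] :: f l) {L : List (List Char)} (hL : L ≠ []) :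
    (consHead [c] L).flatMap f = [] :: L.flatMap f := by
  rcases L with _ | ⟨g, gs⟩
  · exact absurd rfl hL
  · simp [consHead, hc g]

theorem fm_pass {f : List Char → List (List Char)} {c : Char}
    (hf : ∀ l, f l ≠ []) (hc : ∀ l, f (c :: l) = consHead [c] (f l))
    {L : List (List Char)} (hL : L ≠ []) :
    (consHead [c] L).flatMap f = consHead [c] (L.flatMap f) := by
  rcases L with _ | ⟨g, gs⟩
  · exact absurd rfl hL
  · rcases h : f g with _ | ⟨x, xs⟩
    · exact absurd h (hf g)
    · simp [consHead, hc g, h]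

theorem consHead_append (p : List Char) {L : List (List Char)} (hL : L ≠ [])
    (X : List (List Char)) : consHead p L ++ X = consHead p (L ++ X) := by
  rcases L with _ | ⟨g, gs⟩
  · exact absurd rfl hL
  · simp [consHead]

-- step lemmas for splitC at the concrete separators
theorem sc1_nil : splitC '|' [] [] = [[]] := by simp [splitC]
theorem sc2_nil : splitC ']' ['['] [] = [[]] := by simp [splitC]
theorem sc3_nil : splitC '[' [] [] = [[]] := by simp [splitC]
theorem sc4_nil : splitC ']' [] [] = [[]] := by simp [splitC]

theorem sc1_hit (s : List Char) : splitC '|' [] ('|' :: s) = [] :: splitC '|' [] s := by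
  rw [splitC]; simp [List.isPrefixOf]
theorem sc1_miss {c : Char} (h : c ≠ '|') (s : List Char) :
    splitC '|' [] (c :: s) = consHead [c] (splitC '|' [] s) := by
  rw [splitC]; simp [List.isPrefixOf, Ne.symm h]
theorem sc2_hit (s : List Char) :
    splitC ']' ['['] (']' :: '[' :: s) = [] :: splitC ']' ['['] s := by
  rw [splitC]; simp [List.isPrefixOf]
theorem sc2_miss {c : Char} (h : c ≠ ']') (s : List Char) :
    splitC ']' ['['] (c :: s) = consHead [c] (splitC ']' ['['] s) := by
  rw [splitC]; simp [List.isPrefixOf, Ne.symm h]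
theorem sc2_miss_rb {s : List Char} (h : ∀ t, s ≠ '[' :: t) :
    splitC ']' ['['] (']' :: s) = consHead [']'] (splitC ']' ['['] s) := by
  rcases s with _ | ⟨c, t⟩
  · rw [sc2_nil]
    conv_lhs => rw [splitC]
    rw [if_neg (by decide), sc2_nil]
  · have hc : c ≠ '[' := by intro hh; exact h t (by rw [hh])
    rw [splitC]; simp [List.isPrefixOf, Ne.symm hc]
theorem sc3_hit (s : List Char) : splitC '[' [] ('[' :: s) = [] :: splitC '[' [] s := by
  rw [splitC]; simp [List.isPrefixOf]
theorem sc3_miss {c : Char} (h : c ≠ '[') (s : List Char) :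
    splitC '[' [] (c :: s) = consHead [c] (splitC '[' [] s) := by
  rw [splitC]; simp [List.isPrefixOf, Ne.symm h]
theorem sc4_hit (s : List Char) : splitC ']' [] (']' :: s) = [] :: splitC ']' [] s := by
  rw [splitC]; simp [List.isPrefixOf]
theorem sc4_miss {c : Char} (h : c ≠ ']') (s : List Char) :
    splitC ']' [] (c :: s) = consHead [c] (splitC ']' [] s) := by
  rw [splitC]; simp [List.isPrefixOf, Ne.symm h]

-- head of st1 s starts with '[' only if s does
theorem st1_head {s : List Char} (h : ∀ t, s ≠ '[' :: t) {g : List Char}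
    {gs : List (List Char)} (hg : st1 s = g :: gs) : ∀ t, g ≠ '[' :: t := by
  rcases s with _ | ⟨c, u⟩
  · unfold st1 at hg; rw [sc1_nil] at hg
    injection hg with h1 _; intro t ht; rw [ht] at h1; cases h1
  · by_cases hc : c = '|'
    · subst hc; unfold st1 at hg; rw [sc1_hit] at hg
      injection hg with h1 _; intro t ht; rw [ht] at h1; cases h1
    · unfold st1 at hg; rw [sc1_miss hc] at hg
      rcases hu : splitC '|' [] u with _ | ⟨g', gs'⟩
      · exact absurd hu (splitC_ne_nil _ _ _)
      · rw [hu] at hg; simp only [consHead, List.singleton_append] at hg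
        injection hg with h1 _
        intro t ht
        rw [← h1] at ht
        injection ht with hc2 _
        exact h u (by rw [hc2])

theorem pipeAll_nil : pipeAll [] = [[]] := by
  simp [pipeAll, st3, st2, st1, sc1_nil, sc2_nil, sc3_nil, sc4_nil]

theorem scanB_nil (cur : List Char) : scanB cur [] = [cur] := by rw [scanB]

theorem scanB_cons (cur : List Char) (c : Char) (rest : List Char) :
    scanB cur (c :: rest)
      = if c = ']' ∧ rest.take 1 = ['['] then cur :: scanB [] (rest.drop 1)
        else if c = '|' ∨ c = '[' ∨ c = ']' then cur :: scanB [] rest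
        else scanB (cur ++ [c]) rest := by rw [scanB]

theorem pipe_pipe (s : List Char) : pipeAll ('|' :: s) = [] :: pipeAll s := by
  unfold pipeAll st3 st2 st1
  rw [sc1_hit, fm_cut sc2_nil, fm_cut sc3_nil, fm_cut sc4_nil]

theorem pipe_rblb (s : List Char) : pipeAll (']' :: '[' :: s) = [] :: pipeAll s := by
  unfold pipeAll st3 st2 st1
  rw [sc1_miss (by decide), sc1_miss (by decide)]
  rcases hg : splitC '|' [] s with _ | ⟨g, gs⟩
  · exact absurd hg (splitC_ne_nil _ _ _)
  · simp only [consHead, List.singleton_append]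
    rw [List.flatMap_cons, sc2_hit, List.cons_append, ← List.flatMap_cons]
    rw [fm_cut sc3_nil, fm_cut sc4_nil]

theorem pipe_lb (s : List Char) : pipeAll ('[' :: s) = [] :: pipeAll s := by
  unfold pipeAll st3 st2 st1
  rw [sc1_miss (by decide)]
  rw [fm_pass (splitC_ne_nil _ _) (fun l => sc2_miss (by decide) l) (splitC_ne_nil _ _ _)]
  rw [fm_cut_at sc3_hit (flatMap_ne_nil (splitC_ne_nil _ _) (splitC_ne_nil _ _ _))]
  rw [fm_cut sc4_nil]

theorem pipe_rb {s : List Char} (h : ∀ t, s ≠ '[' :: t) :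
    pipeAll (']' :: s) = [] :: pipeAll s := by
  unfold pipeAll st3 st2 st1
  rw [sc1_miss (by decide)]
  rcases hg : splitC '|' [] s with _ | ⟨g, gs⟩
  · exact absurd hg (splitC_ne_nil _ _ _)
  · have hgh : ∀ t, g ≠ '[' :: t := st1_head h (by unfold st1; exact hg)
    simp only [consHead, List.singleton_append]
    rw [List.flatMap_cons, sc2_miss_rb hgh]
    rw [consHead_append [']'] (splitC_ne_nil _ _ _) _, ← List.flatMap_cons]
    rw [fm_pass (splitC_ne_nil _ _) (fun l => sc3_miss (by decide) l)
        (flatMap_ne_nil (splitC_ne_nil _ _) (List.cons_ne_nil _ _))]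
    rw [fm_cut_at sc4_hit
        (flatMap_ne_nil (splitC_ne_nil _ _)
          (flatMap_ne_nil (splitC_ne_nil _ _) (List.cons_ne_nil _ _)))]

theorem pipe_other {c : Char} (h1 : c ≠ '|') (h2 : c ≠ '[') (h3 : c ≠ ']')
    (s : List Char) : pipeAll (c :: s) = consHead [c] (pipeAll s) := by
  unfold pipeAll st3 st2 st1
  rw [sc1_miss h1]
  rw [fm_pass (splitC_ne_nil _ _) (fun l => sc2_miss h3 l) (splitC_ne_nil _ _ _)]
  rw [fm_pass (splitC_ne_nil _ _) (fun l => sc3_miss h2 l)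
      (flatMap_ne_nil (splitC_ne_nil _ _) (splitC_ne_nil _ _ _))]
  rw [fm_pass (splitC_ne_nil _ _) (fun l => sc4_miss h3 l)
      (flatMap_ne_nil (splitC_ne_nil _ _)
        (flatMap_ne_nil (splitC_ne_nil _ _) (splitC_ne_nil _ _ _)))]

theorem scanB_eq (n : Nat) : ∀ (s : List Char), s.length ≤ n → ∀ (cur : List Char),
    scanB cur s = consHead cur (pipeAll s) := by
  induction n with
  | zero =>
    intro s hs cur
    have hnil : s = [] := List.eq_nil_of_length_eq_zero (Nat.le_zero.mp hs)
    subst hnil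
    rw [scanB_nil, pipeAll_nil]
    simp [consHead]
  | succ n ih =>
    intro s hs cur
    rcases s with _ | ⟨c, rest⟩
    · rw [scanB_nil, pipeAll_nil]; simp [consHead]
    · rw [scanB_cons]
      by_cases h1 : c = ']' ∧ rest.take 1 = ['[']
      · rw [if_pos h1]
        obtain ⟨hc, ht⟩ := h1
        subst hc
        rcases rest with _ | ⟨d, t⟩
        · simp at ht
        · have hd : d = '[' := by simpa using ht
          subst hd
          rw [show ('[' :: t).drop 1 = t from rfl]
          rw [ih t (by simp at hs; omega) []]
          rw [pipe_rblb]
          rcases hp : pipeAll t with _ | ⟨g, gs⟩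
          · exact absurd hp (pipeAll_ne_nil _)
          · simp [consHead]
      · rw [if_neg h1]
        by_cases h2 : c = '|' ∨ c = '[' ∨ c = ']'
        · rw [if_pos h2]
          rw [ih rest (by simp at hs; omega) []]
          have hstep : pipeAll (c :: rest) = [] :: pipeAll rest := by
            rcases h2 with h | h | h
            · subst h; exact pipe_pipe rest
            · subst h; exact pipe_lb rest
            · subst h
              apply pipe_rb
              intro t ht
              exact h1 ⟨rfl, by rw [ht]; rfl⟩
          rw [hstep]
          rcases hp : pipeAll rest with _ | ⟨g, gs⟩
          · exact absurd hp (pipeAll_ne_nil _)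
          · simp [consHead]
        · rw [if_neg h2]
          push Not at h2
          rw [ih rest (by simp at hs; omega) (cur ++ [c])]
          rw [pipe_other h2.1 h2.2.1 h2.2.2]
          rcases hp : pipeAll rest with _ | ⟨g, gs⟩
          · exact absurd hp (pipeAll_ne_nil _)
          · simp [consHead]

theorem split_getD (s : String) (d : String) (s0 : Char) (sep : List Char)
    (hd : d.toList = s0 :: sep) :
    (PySem.Str.split? s d).getD [] = (splitC s0 sep s.toList).map String.ofList := by
  rw [show PySem.Str.split? s d
        = Option.map (List.map String.ofList)
            (PySem.Chars.split? s.toList d.toList) from rfl]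
  rw [hd]
  rw [show PySem.Chars.split? s.toList (s0 :: sep)
        = some (PySem.Chars.splitOn s.toList (s0 :: sep)) from by
      simp [PySem.Chars.split?]]
  rw [splitOn_eq]
  rfl

theorem stage_fold (L : List (List Char)) (d : String) (s0 : Char) (sep : List Char)
    (hd : d.toList = s0 :: sep) :
    (L.map String.ofList).foldl
        (fun new_string_set element =>
          new_string_set ++ ((PySem.Str.split? element d).getD [])) []
      = (L.flatMap (splitC s0 sep)).map String.ofList := by
  rw [PySem.List.foldl_append_eq_flatMap, List.nil_append, List.map_flatMap]
  rw [List.flatMap_map]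
  have key : ∀ l : List Char,
      (PySem.Str.split? (String.ofList l) d).getD []
        = (splitC s0 sep l).map String.ofList := by
    intro l
    rw [split_getD _ _ _ _ hd, String.toList_ofList]
  simp only [key]

theorem a_eq (s : String) :
    split_string_into_groups_py s = (pipeAll s.toList).map String.ofList := by
  unfold split_string_into_groups_py
  simp only [List.foldl_cons, List.foldl_nil, List.nil_append]
  rw [split_getD s "|" '|' [] rfl]
  rw [stage_fold _ "][" ']' ['['] rfl]
  rw [stage_fold _ "[" '[' [] rfl]
  rw [stage_fold _ "]" ']' [] rfl]
  unfold pipeAll st3 st2 st1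
  rfl

-- ===== VERDICT (by name: the statement is the Claim_ definition above) =====
theorem split_string_into_groups_py_spec : Claim_equal_split_string_into_groups_py := by
  intro s _
  unfold Spec_split_string_into_groups_py split_string_into_groups_py_alt
  rw [a_eq, scanB_eq s.toList.length s.toList le_rfl []]
  rcases h : pipeAll s.toList with _ | ⟨g, gs⟩
  · exact absurd h (pipeAll_ne_nil _)
  · simp [consHead]
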